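-- pv_equiv track=rewrite | github.com/lorenzotini/Best-search-engine-in-the-world | Utils/indexer.py | _is_exact_phrase
-- ===== SOURCE A (Python) =====
-- def _is_exact_phrase(positions_list):
--     """
--     Check if terms occur as an exact phrase in order.
--
--     Args:
--         positions_list: list of lists -> positions of each term in doc
--
--     Returns:
--         bool: True if terms appear consecutively in order
--     """
--     # Start with positions of the first term
--     first_term_positions = positions_list[0]
--
--     for pos in first_term_positions:
--         match = True
--         current_pos = pos
--         for i in range(1, len(positions_list)):
--             # Check if next term occurs at current_pos + 1
--             if (current_pos + 1) in positions_list[i]: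
--                 current_pos += 1
--             else:
--                 match = False
--                 break
--         if match:
--             return True  # Found exact phrase
--     return False
-- ===== SOURCE B (Python) =====
-- def _is_exact_phrase(positions_list):
--     # Fold of set intersections over shifted position sets: a start position x
--     # survives iff term i occurs at x + i for every i.
--     result = set(positions_list[0])
--     for i in range(1, len(positions_list)):
--         result &= {x - i for x in positions_list[i]}
--     return bool(result)
-- ===== Notes on version B (the rewrite author's own statement) =====
-- stated objective: alternative
-- what changed: Replaces the per-candidate rescanning loops (for each first-term position, walk the remaining terms checking current_pos+1 membership) by a single fold that intersects the first term's position set with each later term's positions shifted left by i, returning whether any start survives.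
import Mathlib
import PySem

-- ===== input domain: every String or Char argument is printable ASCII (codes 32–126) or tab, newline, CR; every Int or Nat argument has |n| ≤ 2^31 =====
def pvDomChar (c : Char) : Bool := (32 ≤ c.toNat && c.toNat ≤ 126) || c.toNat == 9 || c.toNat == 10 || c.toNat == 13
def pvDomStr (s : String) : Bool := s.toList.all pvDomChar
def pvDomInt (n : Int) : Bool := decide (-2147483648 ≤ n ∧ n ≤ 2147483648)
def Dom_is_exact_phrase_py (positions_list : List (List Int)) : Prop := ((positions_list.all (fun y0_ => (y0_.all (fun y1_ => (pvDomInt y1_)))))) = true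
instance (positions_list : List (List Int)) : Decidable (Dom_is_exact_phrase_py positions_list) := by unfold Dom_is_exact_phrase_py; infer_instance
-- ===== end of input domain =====

-- B replaces A's per-candidate rescanning loops with one fold of set intersections
-- over shifted position sets (objective: alternative; return value only).

-- ===== PORT A =====
-- inner loop body of A: state = (match, current_pos)
def pvAStep (pl : List (List Int)) (st : Bool × Int) (i : Nat) : Bool × Int :=
  if st.1 then
    if (pl.getD i []).contains (st.2 + 1) then (true, st.2 + 1) else (false, st.2)
  else st

def is_exact_phrase_py (positions_list : List (List Int)) : Bool :=
  -- positions_list[0]: Pre_ excludes [], where Python raises IndexError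
  (positions_list.getD 0 []).any (fun pos =>
    ((List.range' 1 (positions_list.length - 1)).foldl (pvAStep positions_list) (true, pos)).1)

-- ===== PORT B =====
def pvBStep (pl : List (List Int)) (res : PySem.Set Int) (i : Nat) : PySem.Set Int :=
  PySem.Set.inter res (PySem.Set.ofList ((pl.getD i []).map (fun x => x - (i : Int))))

def is_exact_phrase_py_alt (positions_list : List (List Int)) : Bool :=
  let result : PySem.Set Int :=
    (List.range' 1 (positions_list.length - 1)).foldl (pvBStep positions_list)
      (PySem.Set.ofList (positions_list.getD 0 []))
  !result.isEmpty

-- ===== PRECONDITION & SPEC =====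
-- Pre_ excludes only the empty list, on which Python A raises IndexError at positions_list[0].
def Pre_is_exact_phrase_py (positions_list : List (List Int)) : Prop := positions_list ≠ []
instance (positions_list : List (List Int)) : Decidable (Pre_is_exact_phrase_py positions_list) := by unfold Pre_is_exact_phrase_py; infer_instance
def pvWitness_is_exact_phrase_py : List (List Int) := [[1, 5], [2, 9], [3]]

def Spec_is_exact_phrase_py (positions_list : List (List Int)) (out : Bool) : Prop := out = is_exact_phrase_py_alt positions_list
instance (positions_list : List (List Int)) (out : Bool) : Decidable (Spec_is_exact_phrase_py positions_list out) := by unfold Spec_is_exact_phrase_py; infer_instance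

-- ===== CLAIM (what is proved, stated in full; the proofs are below) =====
def Claim_equal_is_exact_phrase_py : Prop := ∀ (positions_list : List (List Int)), Dom_is_exact_phrase_py positions_list → Pre_is_exact_phrase_py positions_list → Spec_is_exact_phrase_py positions_list (is_exact_phrase_py positions_list)

-- ===== LEMMAS AND PROOFS =====

-- A's inner loop stays false once match is false
lemma pvA_false (pl : List (List Int)) (l : List Nat) (c : Int) :
    (l.foldl (pvAStep pl) (false, c)).1 = false := by
  induction l generalizing c with
  | nil => rfl
  | cons i l ih => simpa [pvAStep] using ih c

-- characterisation of A's inner loop over a consecutive index range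
lemma pvA_char (pl : List (List Int)) (k a : Nat) (pos : Int) :
    ((List.range' a k).foldl (pvAStep pl) (true, pos)).1
      = decide (∀ j < k, (pos + j + 1) ∈ pl.getD (a + j) []) := by
  induction k generalizing a pos with
  | zero => simp
  | succ k ih =>
    rw [List.range'_succ, List.foldl_cons]
    by_cases h : (pos + 1) ∈ pl.getD a []
    · have hstep : pvAStep pl (true, pos) a = (true, pos + 1) := by
        simp [pvAStep, - List.getD_eq_getElem?_getD, h]
      rw [hstep, ih, decide_eq_decide]
      constructor
      · intro hall j hj
        match j, hj with
        | 0, _ => simpa using h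
        | (j'+1), hj' =>
          have := hall j' (by omega)
          have e1 : pos + (↑(j' + 1) : Int) + 1 = pos + 1 + ↑j' + 1 := by push_cast; ring
          have e2 : a + (j' + 1) = a + 1 + j' := by omega
          rw [e1, e2]; exact this
      · intro hall j hj
        have := hall (j + 1) (by omega)
        have e1 : pos + 1 + (↑j : Int) + 1 = pos + ↑(j + 1) + 1 := by push_cast; ring
        have e2 : a + 1 + j = a + (j + 1) := by omega
        rw [e1, e2]; exact this
    · have hstep : pvAStep pl (true, pos) a = (false, pos) := by
        simp [pvAStep, - List.getD_eq_getElem?_getD, h]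
      rw [hstep, pvA_false]
      symm
      simp only [decide_eq_false_iff_not]
      intro hall
      exact h (by simpa using hall 0 (by omega))

-- membership characterisation of B's fold of intersections
lemma pvB_char (pl : List (List Int)) (k a : Nat) (s : PySem.Set Int) (x : Int) :
    x ∈ (List.range' a k).foldl (pvBStep pl) s
      ↔ x ∈ s ∧ ∀ j < k, (x + (a + j)) ∈ pl.getD (a + j) [] := by
  induction k generalizing a s with
  | zero => simp
  | succ k ih =>
    rw [List.range'_succ, List.foldl_cons, ih]
    simp only [pvBStep, PySem.Set.mem_inter, PySem.Set.mem_ofList, List.mem_map]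
    constructor
    · rintro ⟨⟨hs, y, hy, hxy⟩, hall⟩
      refine ⟨hs, fun j hj => ?_⟩
      match j, hj with
      | 0, _ => simpa using (by omega : x + ((a : Int) + 0) = y) ▸ hy
      | (j'+1), hj' =>
        have := hall j' (by omega)
        have e : (x + (↑a + ↑(j' + 1)) : Int) = x + (↑(a + 1) + ↑j') := by push_cast; ring
        have e2 : a + (j' + 1) = a + 1 + j' := by omega
        rw [e, e2]; exact this
    · rintro ⟨hs, hall⟩
      refine ⟨⟨hs, x + a, ?_, by ring⟩, fun j hj => ?_⟩
      · simpa using hall 0 (by omega)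
      · have := hall (j + 1) (by omega)
        have e : (x + (↑a + ↑(j + 1)) : Int) = x + (↑(a + 1) + ↑j) := by push_cast; ring
        have e2 : a + (j + 1) = a + 1 + j := by omega
        rw [← e, ← e2]; exact this

-- ===== VERDICT (by name: the statement is the Claim_ definition above) =====
theorem is_exact_phrase_py_spec : Claim_equal_is_exact_phrase_py := by
  intro pl _ _
  unfold Spec_is_exact_phrase_py is_exact_phrase_py is_exact_phrase_py_alt
  rw [Bool.eq_iff_iff]
  dsimp only
  simp only [List.any_eq_true, Bool.not_eq_true', List.isEmpty_eq_false_iff_exists_mem]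
  constructor
  · rintro ⟨pos, hpos, hloop⟩
    refine ⟨pos, ?_⟩
    rw [pvB_char]
    rw [pvA_char] at hloop
    have hall := of_decide_eq_true hloop
    refine ⟨by simpa [PySem.Set.mem_ofList] using hpos, fun j hj => ?_⟩
    have := hall j hj
    have e : (pos + ((1 : Nat) + j) : Int) = pos + j + 1 := by push_cast; ring
    rw [e]; exact this
  · rintro ⟨x, hx⟩
    rw [pvB_char] at hx
    obtain ⟨hs, hall⟩ := hx
    refine ⟨x, by simpa [PySem.Set.mem_ofList] using hs, ?_⟩
    rw [pvA_char]
    apply decide_eq_true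
    intro j hj
    have := hall j hj
    have e : (x + ((1 : Nat) + j) : Int) = x + j + 1 := by push_cast; ring
    rw [← e]; exact this
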